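-- pv_equiv track=rewrite | github.com/Jiaxuan1/Fundamentals-of-Programming-and-Computer-Science | hw3.py | encodeRightLeftRouteCipher
-- ===== SOURCE A (Python) =====
-- def addLowerletter(s, rows):
--     blank = rows - (len(s) % rows)
--     source = "ABCDEFGHIJKLMNOPQRSTUVWXYZ"[::-1].lower()
--     for i in range(blank):
--         while i >= 26:
--             i -= 26
--         s += source[i]
--     return s
--
-- def encodeRightLeftRouteCipher(text, rows):
--     text = addLowerletter(text, rows)
--     newstring = ""
--     for i in range(rows):
--         for j in range(len(text)):
--             if j % rows == i:
--                 newstring += text[j]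
--     counter = 0
--     finalString = ""
--     cols = int(len(text) / rows)
--     while counter < rows:
--         if counter % 2 == 0:
--             finalString += newstring[counter*cols:counter*cols + cols]
--         else:
--             finalString += newstring[counter*cols:counter*cols + cols][::-1]
--         counter += 1
--     return str(rows) + finalString
-- ===== SOURCE B (Python) =====
-- def encodeRightLeftRouteCipher(text, rows):
--     pad = rows - len(text) % rows
--     text += "".join("zyxwvutsrqponmlkjihgfedcba"[i % 26] for i in range(pad))
--     buckets = {}
--     for j, ch in enumerate(text):
--         buckets.setdefault(j % rows, []).append(ch)
--     parts = []
--     for i in range(rows):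
--         row = "".join(buckets.get(i, []))
--         parts.append(row if i % 2 == 0 else row[::-1])
--     return str(rows) + "".join(parts)
-- ===== Notes on version B (the rewrite author's own statement) =====
-- stated objective: faster
-- what changed: A rescans the whole padded text once per row (and re-normalizes the pad index with a while loop); B makes a single pass bucketing characters by index mod rows into a dict and joins the buckets with alternate reversal.
import Mathlib
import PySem

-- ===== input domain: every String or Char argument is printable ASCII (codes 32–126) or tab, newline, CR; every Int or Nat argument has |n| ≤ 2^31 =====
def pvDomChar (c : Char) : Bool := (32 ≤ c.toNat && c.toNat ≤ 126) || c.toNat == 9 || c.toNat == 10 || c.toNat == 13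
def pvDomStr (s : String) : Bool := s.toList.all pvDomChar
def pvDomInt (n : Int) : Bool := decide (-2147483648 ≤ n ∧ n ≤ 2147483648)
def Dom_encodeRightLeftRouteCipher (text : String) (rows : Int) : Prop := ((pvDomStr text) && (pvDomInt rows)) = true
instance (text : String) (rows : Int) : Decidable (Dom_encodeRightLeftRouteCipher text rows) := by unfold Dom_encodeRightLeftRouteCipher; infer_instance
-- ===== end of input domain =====

-- B replaces A's per-row full scans of the text by a single bucketing pass (one dict lookup
-- per character), keeping the exact output; the equivalence below is on rows ≠ 0.

-- ===== PORT A =====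
-- 'while i >= 26: i -= 26' from addLowerletter
def pvWhile26 (i : Int) : Int :=
  if h : 26 ≤ i then pvWhile26 (i - 26) else i
termination_by i.toNat
decreasing_by omega

-- helper addLowerletter of A, on code-point lists
def addLowerletter (s : List Char) (rows : Int) : List Char :=
  let blank := rows - PySem.Int.mod (s.length : Int) rows
  -- "ABCDEFGHIJKLMNOPQRSTUVWXYZ"[::-1].lower(); slice? with step -1 never returns none
  let source := PySem.Chars.lower ((PySem.List.slice? "ABCDEFGHIJKLMNOPQRSTUVWXYZ".toList none none (-1)).getD [])
  (PySem.List.pyRange 0 blank).foldl (fun acc i => acc ++ [PySem.List.pyGetD source (pvWhile26 i) ' ']) s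

def encodeRightLeftRouteCipher (text : String) (rows : Int) : String :=
  let t := addLowerletter text.toList rows
  let newstring := (PySem.List.pyRange 0 rows).foldl (fun acc i =>
      (PySem.List.pyRange 0 (t.length : Int)).foldl (fun acc2 j =>
        if PySem.Int.mod j rows == i then acc2 ++ [PySem.List.pyGetD t j ' '] else acc2) acc) []
  -- cols = int(len(text) / rows): exact truncating division on this domain
  let cols := PySem.Int.truncdiv (t.length : Int) rows
  let finalString := (PySem.List.pyRange 0 rows).foldl (fun acc counter =>
      if PySem.Int.mod counter 2 == 0 then
        acc ++ PySem.List.slice newstring (some (counter * cols)) (some (counter * cols + cols))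
      else
        acc ++ (PySem.List.slice newstring (some (counter * cols)) (some (counter * cols + cols))).reverse) []
  String.ofList (PySem.Int.toChars rows ++ finalString)

-- ===== PORT B =====
def encodeRightLeftRouteCipher_alt (text : String) (rows : Int) : String :=
  let pad := rows - PySem.Int.mod (text.toList.length : Int) rows
  let t := text.toList ++
    (PySem.List.pyRange 0 pad).map
      (fun i => PySem.List.pyGetD "zyxwvutsrqponmlkjihgfedcba".toList (PySem.Int.mod i 26) ' ')
  let buckets := (PySem.List.enumerate t).foldl
      (fun d p => d.modify (PySem.Int.mod p.1 rows) [] (· ++ [p.2])) PySem.Dict.empty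
  let parts := (PySem.List.pyRange 0 rows).map (fun i =>
      let row := buckets.getD i []
      if PySem.Int.mod i 2 == 0 then row else row.reverse)
  String.ofList (PySem.Int.toChars rows ++ parts.flatten)

-- ===== PRECONDITION & SPEC =====
-- Pre_ excludes exactly rows = 0, where A (and B alike) raises ZeroDivisionError on 'len(s) % rows'.
def Pre_encodeRightLeftRouteCipher (text : String) (rows : Int) : Prop := rows ≠ 0
instance (text : String) (rows : Int) : Decidable (Pre_encodeRightLeftRouteCipher text rows) := by unfold Pre_encodeRightLeftRouteCipher; infer_instance

def pvWitness_encodeRightLeftRouteCipher : String × Int := ("WEATHER IS CLEAR", 3)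

def Spec_encodeRightLeftRouteCipher (text : String) (rows : Int) (out : String) : Prop := out = encodeRightLeftRouteCipher_alt text rows
instance (text : String) (rows : Int) (out : String) : Decidable (Spec_encodeRightLeftRouteCipher text rows out) := by unfold Spec_encodeRightLeftRouteCipher; infer_instance

-- ===== CLAIM (what is proved, stated in full; the proofs are below) =====
def Claim_equal_encodeRightLeftRouteCipher : Prop := ∀ (text : String) (rows : Int), Dom_encodeRightLeftRouteCipher text rows → Pre_encodeRightLeftRouteCipher text rows → Spec_encodeRightLeftRouteCipher text rows (encodeRightLeftRouteCipher text rows)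

-- ===== LEMMAS AND PROOFS =====

theorem pvMain_neg (text : String) (rows : Int) (hneg : rows < 0) :
    encodeRightLeftRouteCipher text rows = encodeRightLeftRouteCipher_alt text rows := by
  have hrownil : PySem.List.pyRange 0 rows = [] :=
    PySem.List.pyRange_one_eq_nil (by omega)
  simp [encodeRightLeftRouteCipher, encodeRightLeftRouteCipher_alt, addLowerletter, hrownil]

theorem pvWhile26_eq (i : Int) (h : 0 ≤ i) : pvWhile26 i = PySem.Int.mod i 26 := by
  rw [PySem.Int.mod_eq_emod_of_pos (by norm_num)]
  fun_induction pvWhile26 i with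
  | case1 i hge ih =>
      rw [ih (by omega)]
      omega
  | case2 i hlt =>
      omega

theorem pv_countP_mod (r cq k : Nat) (hk : k < r) :
    (List.range (r * cq)).countP (fun j => j % r == k) = cq := by
  induction cq with
  | zero => simp
  | succ c ih =>
      have : r * (c + 1) = r * c + r := by ring
      rw [this, List.range_add, List.countP_append, ih, List.countP_map]
      have h1 : (List.range r).countP ((fun j => j % r == k) ∘ (fun x => r * c + x)) =
          (List.range r).countP (fun j => j == k) := by
        apply List.countP_congr
        intro j hj
        simp only [List.mem_range] at hj
        simp [Function.comp, Nat.mod_eq_of_lt hj]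
      rw [h1]
      have h2 : (List.range r).countP (fun j => j == k) = List.count k (List.range r) := by
        simp [List.count_eq_countP]
      rw [h2, List.count_eq_one_of_mem (List.nodup_range) (by simpa using hk)]

theorem pv_flatMap_slice {α : Type} (L : List Int) (G : Int → List α) (cq : Nat)
    (h : ∀ x ∈ L, (G x).length = cq) :
    ∀ (k : Nat) (hk : k < L.length), ((L.flatMap G).drop (k * cq)).take cq = G L[k] := by
  induction L with
  | nil => intro k hk; simp at hk
  | cons x xs ih =>
      intro k hk
      have hx : (G x).length = cq := h x (List.mem_cons_self)
      cases k with
      | zero =>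
          simp [List.flatMap_cons, hx]
      | succ k' =>
          have hkc : (k' + 1) * cq = (G x).length + k' * cq := by rw [hx]; ring
          rw [List.flatMap_cons, hkc, List.drop_append]
          simp only [List.drop_of_length_le (by omega : (G x).length ≤ (G x).length + k' * cq),
            Nat.add_sub_cancel_left, List.nil_append, List.getElem_cons_succ]
          exact ih (fun y hy => h y (List.mem_cons_of_mem _ hy)) k' (by simpa using hk)

def pvRow (t : List Char) (rows i : Int) : List Char :=
  ((PySem.List.pyRange 0 (t.length : Int)).filter (fun j => PySem.Int.mod j rows == i)).map
    (fun j => PySem.List.pyGetD t j ' ')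

theorem pvRow_length (t : List Char) (rows cols : Int) (k : Nat)
    (hpos : 0 < rows) (hcols : 0 ≤ cols) (hm : (t.length : Int) = rows * cols)
    (hk : (k : Int) < rows) :
    (pvRow t rows (k : Int)).length = cols.toNat := by
  have hr : rows = ((rows.toNat : Nat) : Int) := by omega
  have hn : t.length = rows.toNat * cols.toNat := by
    have h1 : ((rows.toNat * cols.toNat : Nat) : Int) = rows * cols := by
      push_cast
      rw [Int.toNat_of_nonneg (le_of_lt hpos), Int.toNat_of_nonneg hcols]
    omega
  rw [pvRow, List.length_map, ← List.countP_eq_length_filter, hn, PySem.List.pyRange_zero_nat,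
    List.countP_map]
  rw [show ((fun j => PySem.Int.mod j rows == (k : Int)) ∘ (fun x : Nat => (x : Int))) =
      (fun j : Nat => j % rows.toNat == k) from ?_]
  · exact pv_countP_mod rows.toNat cols.toNat k (by omega)
  · funext j
    rw [Function.comp_apply, hr, PySem.Int.mod_natCast, Bool.eq_iff_iff]
    simp only [beq_iff_eq, Int.toNat_natCast]
    omega

theorem pvMain_pos (text : String) (rows : Int) (hpos : 0 < rows) :
    encodeRightLeftRouteCipher text rows = encodeRightLeftRouteCipher_alt text rows := by
  have hsource : PySem.Chars.lower ((PySem.List.slice? "ABCDEFGHIJKLMNOPQRSTUVWXYZ".toList none none (-1)).getD []) = "zyxwvutsrqponmlkjihgfedcba".toList := by decide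
  simp only [encodeRightLeftRouteCipher, encodeRightLeftRouteCipher_alt]
  set s := text.toList with hs
  set blank := rows - PySem.Int.mod (s.length : Int) rows with hblank
  set T := s ++ (PySem.List.pyRange 0 blank).map
      (fun i => PySem.List.pyGetD "zyxwvutsrqponmlkjihgfedcba".toList (PySem.Int.mod i 26) ' ') with hT
  have hpadeq : addLowerletter s rows = T := by
    rw [addLowerletter]
    rw [PySem.List.foldl_append_singleton_eq_map]
    rw [hT]
    congr 1
    apply List.map_congr_left
    intro i hi
    have h0 : 0 ≤ i := (PySem.List.mem_pyRange_one.mp hi).1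
    rw [pvWhile26_eq i h0, hsource]
  rw [hpadeq]
  -- arithmetic: the padded length is an exact multiple of rows
  have hmod0 : 0 ≤ PySem.Int.mod (s.length : Int) rows := PySem.Int.mod_nonneg _ hpos
  have hmodlt : PySem.Int.mod (s.length : Int) rows < rows := PySem.Int.mod_lt _ hpos
  have hblankpos : 0 < blank := by omega
  have hTlen : (T.length : Int) = (s.length : Int) + blank := by
    rw [hT]
    simp [PySem.List.length_pyRange_one]
    omega
  have hfm := PySem.Int.floordiv_mul_add_mod ((s.length : Int)) rows
  have hfd0 : 0 ≤ PySem.Int.floordiv ((s.length : Int)) rows := by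
    rw [PySem.Int.le_floordiv_iff_mul_le hpos]
    simp
  set q : Int := PySem.Int.floordiv ((s.length : Int)) rows + 1 with hqdef
  have hq : (T.length : Int) = rows * q := by
    have h1 : rows * q = (PySem.Int.floordiv ((s.length : Int)) rows) * rows + rows := by
      rw [hqdef]; ring
    rw [hTlen, h1]
    omega
  have hq1 : 1 ≤ q := by omega
  have hcols : PySem.Int.truncdiv ((T.length : Int)) rows = q := by
    rw [hq, PySem.Int.truncdiv]
    exact Int.mul_tdiv_cancel_left q (by omega)
  rw [hcols]
  -- the inner residue-collecting loop of A is pvRow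
  have hin : ∀ (acc : List Char) (i : Int),
      List.foldl (fun acc2 j => if (PySem.Int.mod j rows == i) = true then acc2 ++ [PySem.List.pyGetD T j ' '] else acc2) acc (PySem.List.pyRange 0 (T.length : Int)) = acc ++ pvRow T rows i := by
    intro acc i
    rw [pvRow]
    exact PySem.List.foldl_append_if _ _ _ _
  simp only [hin]
  rw [PySem.List.foldl_append_eq_flatMap, List.nil_append]
  -- A's boustrophedon while-loop as a flatMap
  have hsplit : (fun (acc : List Char) (counter : Int) =>
      if (PySem.Int.mod counter 2 == 0) = true then
        acc ++ PySem.List.slice ((PySem.List.pyRange 0 rows).flatMap (pvRow T rows)) (some (counter * q)) (some (counter * q + q))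
      else
        acc ++ (PySem.List.slice ((PySem.List.pyRange 0 rows).flatMap (pvRow T rows)) (some (counter * q)) (some (counter * q + q))).reverse) =
      (fun acc counter => acc ++
        (if (PySem.Int.mod counter 2 == 0) = true then
          PySem.List.slice ((PySem.List.pyRange 0 rows).flatMap (pvRow T rows)) (some (counter * q)) (some (counter * q + q))
        else
          (PySem.List.slice ((PySem.List.pyRange 0 rows).flatMap (pvRow T rows)) (some (counter * q)) (some (counter * q + q))).reverse)) := by
    funext acc counter
    split <;> rfl
  rw [hsplit, PySem.List.foldl_append_eq_flatMap, List.nil_append]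
  -- B's buckets: getD is pvRow
  have hbucket : ∀ i : Int,
      ((PySem.List.enumerate T).foldl (fun (d : PySem.Dict Int (List Char)) p => d.modify (PySem.Int.mod p.1 rows) [] (· ++ [p.2])) PySem.Dict.empty).getD i [] = pvRow T rows i := by
    intro i
    rw [PySem.List.enumerate_eq_map_pyRange T ' ', List.foldl_map,
      ← List.foldl_map (f := fun j => (PySem.Int.mod j rows, PySem.List.pyGetD T j ' '))
        (g := fun (d : PySem.Dict Int (List Char)) p => d.modify p.1 [] (· ++ [p.2])),
      PySem.Dict.getD_foldl_modify_append, List.filter_map, List.map_map]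
    simp only [PySem.Dict.getD_empty, List.nil_append, Function.comp_def]
    rfl
  simp only [hbucket]
  -- the slice of chunk c of A's newstring is pvRow c
  have hall : ∀ x ∈ PySem.List.pyRange 0 rows, (pvRow T rows x).length = q.toNat := by
    intro x hx
    obtain ⟨hx0, hxlt⟩ := PySem.List.mem_pyRange_one.mp hx
    have hxk : x = ((x.toNat : Nat) : Int) := by omega
    rw [hxk]
    exact pvRow_length T rows q x.toNat hpos (by omega) hq (by omega)
  have hchunk : ∀ c ∈ PySem.List.pyRange 0 rows,
      PySem.List.slice ((PySem.List.pyRange 0 rows).flatMap (pvRow T rows)) (some (c * q)) (some (c * q + q)) = pvRow T rows c := by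
    intro c hc
    obtain ⟨h0, hlt⟩ := PySem.List.mem_pyRange_one.mp hc
    have hck : c = ((c.toNat : Nat) : Int) := by omega
    have hqn : q = ((q.toNat : Nat) : Int) := by omega
    have hklen : c.toNat < (PySem.List.pyRange 0 rows).length := by
      rw [PySem.List.length_pyRange_one]; omega
    have hq0 : (0 : Int) ≤ q := by omega
    have hadd : (c * q + q : Int) = ((c.toNat * q.toNat : Nat) : Int) + ((q.toNat : Nat) : Int) := by
      push_cast
      rw [Int.toNat_of_nonneg h0, Int.toNat_of_nonneg hq0]
    have hmul : (c * q : Int) = ((c.toNat * q.toNat : Nat) : Int) := by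
      push_cast
      rw [Int.toNat_of_nonneg h0, Int.toNat_of_nonneg hq0]
    rw [hadd, hmul, PySem.List.slice_natCast_add,
      pv_flatMap_slice (PySem.List.pyRange 0 rows) (pvRow T rows) q.toNat hall c.toNat hklen,
      PySem.List.getElem_pyRange_one, zero_add, Int.toNat_of_nonneg h0]
  -- assemble: both sides are a flatMap of the alternating rows
  rw [List.flatMap_def]
  congr 1
  congr 1
  congr 1
  apply List.map_congr_left
  intro c hc
  rw [hchunk c hc]

-- ===== VERDICT (by name: the statement is the Claim_ definition above) =====
theorem encodeRightLeftRouteCipher_spec : Claim_equal_encodeRightLeftRouteCipher := by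
  intro text rows _hdom hpre
  unfold Pre_encodeRightLeftRouteCipher at hpre
  unfold Spec_encodeRightLeftRouteCipher
  rcases lt_or_gt_of_ne hpre with h | h
  · exact pvMain_neg text rows h
  · exact pvMain_pos text rows h
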